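-- pv_equiv track=rewrite | github.com/clairepeng0808/Python-100 | 14_credit_card_validator.py | multiply_digit
-- ===== SOURCE A (Python) =====
-- def multiply_digit(l):
--     ccnum_list = []
--     for i, e in enumerate(l):
--         if i % 2 == 0:
--             ccnum_list.append(e*2)
--         else:
--             ccnum_list.append(e)
--     return ccnum_list
-- ===== SOURCE B (Python) =====
-- def multiply_digit(l):
--     # pairwise pass over an iterator: double one element, copy the next;
--     # no index counter and no parity test
--     out = []
--     it = iter(l)
--     for x in it:
--         out.append(x * 2)
--         y = next(it, None)
--         if y is None:
--             break
--         out.append(y)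
--     return out
-- ===== Notes on version B (the rewrite author's own statement) =====
-- stated objective: alternative
-- what changed: Replaces the enumerate loop with an index/parity branch by a pairwise pass over an iterator that doubles one element and copies the next, so no index counter or parity test exists.
import Mathlib
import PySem

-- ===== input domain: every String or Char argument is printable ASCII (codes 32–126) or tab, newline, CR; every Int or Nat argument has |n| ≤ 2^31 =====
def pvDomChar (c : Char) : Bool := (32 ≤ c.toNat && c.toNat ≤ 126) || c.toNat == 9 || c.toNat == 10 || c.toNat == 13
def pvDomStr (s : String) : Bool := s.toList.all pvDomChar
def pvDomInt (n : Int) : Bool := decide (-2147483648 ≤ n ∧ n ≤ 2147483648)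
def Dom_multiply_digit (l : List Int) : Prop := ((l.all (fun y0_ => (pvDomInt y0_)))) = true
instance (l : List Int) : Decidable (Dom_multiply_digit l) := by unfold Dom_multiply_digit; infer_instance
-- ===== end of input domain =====

-- B doubles even-indexed elements by pairwise recursion instead of A's enumerate loop with a parity branch.

-- ===== PORT A =====
-- the enumerate loop: counter i, accumulator ccnum_list, parity branch on i
def multiply_digit_goA (i : Nat) (acc : List Int) : List Int → List Int
  | [] => acc
  | e :: rest =>
      multiply_digit_goA (i + 1)
        (if (i : Int) % 2 = 0 then acc ++ [e * 2] else acc ++ [e]) rest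

def multiply_digit (l : List Int) : List Int :=
  multiply_digit_goA 0 [] l

-- ===== PORT B =====
def multiply_digit_alt : List Int → List Int
  | [] => []
  | [x] => [x * 2]
  | x :: y :: rest => [x * 2, y] ++ multiply_digit_alt rest

-- ===== PRECONDITION & SPEC =====
def Spec_multiply_digit (l : List Int) (out : List Int) : Prop := out = multiply_digit_alt l
instance (l : List Int) (out : List Int) : Decidable (Spec_multiply_digit l out) := by unfold Spec_multiply_digit; infer_instance

-- ===== CLAIM (what is proved, stated in full; the proofs are below) =====
def Claim_equal_multiply_digit : Prop := ∀ (l : List Int), Dom_multiply_digit l → Spec_multiply_digit l (multiply_digit l)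

-- ===== LEMMAS AND PROOFS =====
lemma goA_eq_alt : ∀ (l : List Int) (i : Nat) (acc : List Int), i % 2 = 0 →
    multiply_digit_goA i acc l = acc ++ multiply_digit_alt l
  | [], _, acc, _ => by simp [multiply_digit_goA, multiply_digit_alt]
  | [x], i, acc, hi => by
      have h : (i : Int) % 2 = 0 := by omega
      simp [multiply_digit_goA, multiply_digit_alt, h]
  | x :: y :: rest, i, acc, hi => by
      have h : (i : Int) % 2 = 0 := by omega
      have h1 : ¬ ((i : Int) + 1) % 2 = 0 := by omega
      have ih := goA_eq_alt rest (i + 2) (acc ++ [x * 2] ++ [y]) (by omega)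
      simp only [multiply_digit_goA, Nat.cast_add, Nat.cast_one, h, if_pos, if_neg h1]
      have h2 : i + 1 + 1 = i + 2 := rfl
      rw [h2, ih]
      simp [multiply_digit_alt]

-- ===== VERDICT (by name: the statement is the Claim_ definition above) =====
theorem multiply_digit_spec : Claim_equal_multiply_digit := by
  intro l _
  show multiply_digit l = multiply_digit_alt l
  simpa using goA_eq_alt l 0 [] rfl
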